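-- pv_equiv track=rewrite | github.com/iic-jku/TinyWhisper | ihp130/verification/lvs/merge_spice.py | _strip_instances_of
-- ===== SOURCE A (Python) =====
-- def parse_x_line(joined_line):
--     """Parse a subcircuit instantiation line (X line).
--
--     Returns (instance_name, nets_list, subckt_type) or (None, [], None).
--     The subckt_type is the last non-parameter token after the instance name.
--     Parameter tokens contain '=' or start with '$'.
--     """
--     tokens = joined_line.split()
--     if not tokens:
--         return None, [], None
--
--     inst_name = tokens[0]
--
--     # Collect tokens until we hit a parameter (contains '=' or starts with '$')
--     non_param = []
--     for t in tokens[1:]: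
--         if '=' in t or t.startswith('$'):
--             break
--         non_param.append(t)
--
--     if not non_param:
--         return inst_name, [], None
--
--     subckt_type = non_param[-1]
--     nets = non_param[:-1]
--     return inst_name, nets, subckt_type
--
-- def _strip_instances_of(body_lines, targets):
--     """Remove X-instantiation lines that call any subcircuit in *targets*."""
--     result = []
--     i = 0
--     while i < len(body_lines):
--         line = body_lines[i]
--         # Collect continuation lines forming one logical statement
--         group = [line]
--         j = i + 1
--         while j < len(body_lines) and body_lines[j].lstrip().startswith('+'):
--             group.append(body_lines[j])
--             j += 1
--
--         # Join into a single logical line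
--         joined = line
--         for g in group[1:]:
--             joined += ' ' + g.lstrip()[1:].strip()
--         stripped = joined.strip()
--
--         skip = False
--         if stripped and not stripped.startswith('*'):
--             tokens = stripped.split()
--             if tokens and tokens[0][0].lower() == 'x':
--                 _, _, stype = parse_x_line(stripped)
--                 if stype in targets:
--                     skip = True
--
--         if not skip:
--             result.extend(group)
--         i = j
--
--     return result
-- ===== SOURCE B (Python) =====
-- def parse_x_line(joined_line):
--     tokens = joined_line.split()
--     if not tokens:
--         return None, [], None
--     inst_name = tokens[0]
--     non_param = []
--     for t in tokens[1:]:
--         if '=' in t or t.startswith('$'):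
--             break
--         non_param.append(t)
--     if not non_param:
--         return inst_name, [], None
--     return inst_name, non_param[:-1], non_param[-1]
--
--
-- def _keep(group, targets):
--     """True iff this logical statement should stay in the output."""
--     joined = group[0]
--     for g in group[1:]:
--         joined += ' ' + g.lstrip()[1:].strip()
--     stripped = joined.strip()
--     if not stripped or stripped.startswith('*'):
--         return True
--     tokens = stripped.split()
--     if tokens[0][0].lower() != 'x':
--         return True
--     _, _, stype = parse_x_line(stripped)
--     return stype not in targets
--
--
-- def _strip_instances_of(body_lines, targets):
--     # One backward pass: continuation lines are buffered in `pending` until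
--     # their base line is reached, at which point the whole group is decided.
--     result = []
--     pending = []
--     for line in reversed(body_lines):
--         if line.lstrip().startswith('+'):
--             pending = [line] + pending
--         else:
--             group = [line] + pending
--             pending = []
--             if _keep(group, targets):
--                 result = group + result
--     if pending and _keep(pending, targets):
--         result = pending + result
--     return result
-- ===== Notes on version B (the rewrite author's own statement) =====
-- stated objective: alternative
-- what changed: A scans forward with an index-based while loop and an inner look-ahead loop that collects each line's continuation lines before deciding; B makes a single backward pass that buffers continuation lines in a pending list and decides each logical group when its base line is reached, with the keep-test factored into a helper.
import Mathlib
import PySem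

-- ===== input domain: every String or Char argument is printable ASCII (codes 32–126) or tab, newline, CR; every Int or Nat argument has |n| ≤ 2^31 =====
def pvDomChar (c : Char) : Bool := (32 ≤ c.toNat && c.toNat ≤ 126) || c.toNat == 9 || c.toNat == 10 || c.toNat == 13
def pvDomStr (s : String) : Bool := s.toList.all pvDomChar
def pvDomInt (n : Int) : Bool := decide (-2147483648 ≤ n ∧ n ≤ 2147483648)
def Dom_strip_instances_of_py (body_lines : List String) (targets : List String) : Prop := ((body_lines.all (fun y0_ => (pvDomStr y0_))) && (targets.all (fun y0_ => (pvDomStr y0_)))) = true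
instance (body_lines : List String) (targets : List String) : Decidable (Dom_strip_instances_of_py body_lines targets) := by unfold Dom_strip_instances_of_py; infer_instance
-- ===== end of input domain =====

-- B replaces A's forward index loop with inner look-ahead by a single backward pass
-- buffering continuation lines (alternative decomposition; return value proved equal).


-- ===== PORT A =====

-- shared module helper parse_x_line (identical in both Pythons)
-- the inner 'for t in tokens[1:]' loop with its break
def pvCollectNonParam : List String → List String
  | [] => []
  | t :: ts =>
    if PySem.Str.isIn "=" t || PySem.Str.startswith t "$" then []
    else t :: pvCollectNonParam ts

def parse_x_line (joined_line : String) : Option String × List String × Option String :=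
  match PySem.Str.split₀ joined_line with
  | [] => (none, [], none)
  | inst_name :: rest =>
    let non_param := pvCollectNonParam rest
    match non_param with
    | [] => (some inst_name, [], none)
    | _ => (some inst_name, non_param.dropLast, non_param.getLast?)

-- line.lstrip().startswith('+')  (this test appears verbatim in both Pythons)
def pvIsCont (line : String) : Bool :=
  PySem.Str.startswith (PySem.Str.lstrip line) "+"

-- the join loop "joined = line; for g in group[1:]: joined += ' ' + g.lstrip()[1:].strip()"
-- (this loop appears verbatim in both Pythons)
def pvJoinGroup (line : String) (conts : List String) : String :=
  conts.foldl (fun joined g =>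
    joined ++ " " ++ PySem.Str.strip (PySem.Str.slice (PySem.Str.lstrip g) (some 1) none)) line

-- A's inline skip decision for one logical group
def pvSkipA (targets : List String) (line : String) (conts : List String) : Bool :=
  let stripped := PySem.Str.strip (pvJoinGroup line conts)
  if stripped != "" && !(PySem.Str.startswith stripped "*") then
    match PySem.Str.split₀ stripped with
    | [] => false
    | t0 :: _ =>
      if (PySem.Str.pyGet? t0 0).map PySem.Chars.lowerChar == some 'x' then
        match (parse_x_line stripped).2.2 with
        | some stype => targets.contains stype
        | none => false
      else false
  else false

-- the inner "while j < len(body_lines) and body_lines[j].lstrip().startswith('+')"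
def pvTakeConts : List String → List String × List String
  | [] => ([], [])
  | l :: rest =>
    if pvIsCont l then
      let p := pvTakeConts rest
      (l :: p.1, p.2)
    else ([], l :: rest)

theorem pvTakeConts_snd_len : ∀ ls : List String, (pvTakeConts ls).2.length ≤ ls.length := by
  intro ls
  induction ls with
  | nil => simp [pvTakeConts]
  | cons l rest ih =>
    simp only [pvTakeConts]
    split
    · exact Nat.le_succ_of_le ih
    · simp

-- A's outer while loop over i
def pvStripGoA (targets : List String) : List String → List String
  | [] => []
  | line :: rest =>
    let p := pvTakeConts rest
    (if pvSkipA targets line p.1 then [] else line :: p.1) ++ pvStripGoA targets p.2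
termination_by ls => ls.length
decreasing_by
  simpa using Nat.lt_succ_of_le (pvTakeConts_snd_len rest)

def strip_instances_of_py (body_lines : List String) (targets : List String) : List String :=
  pvStripGoA targets body_lines

-- ===== PORT B =====

-- Source B's _keep(group, targets): early-return chain
def pvKeepB (targets : List String) (group : List String) : Bool :=
  match group with
  | [] => true   -- unreachable at every call site (Python's _keep is never called on [])
  | h :: t =>
    let stripped := PySem.Str.strip (pvJoinGroup h t)
    if stripped == "" || PySem.Str.startswith stripped "*" then true
    else
      match PySem.Str.split₀ stripped with
      | [] => true   -- unreachable: stripped is nonempty and stripped of whitespace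
      | t0 :: _ =>
        if (PySem.Str.pyGet? t0 0).map PySem.Chars.lowerChar != some 'x' then true
        else
          match (parse_x_line stripped).2.2 with
          | some stype => !targets.contains stype
          | none => true

-- Source B's backward pass: state = (pending, result), updated right-to-left
def pvStepB (targets : List String) (line : String) (st : List String × List String) :
    List String × List String :=
  if pvIsCont line then (line :: st.1, st.2)
  else ([], if pvKeepB targets (line :: st.1) then (line :: st.1) ++ st.2 else st.2)

def strip_instances_of_py_alt (body_lines : List String) (targets : List String) : List String :=
  let st := body_lines.foldr (pvStepB targets) ([], [])
  if !st.1.isEmpty && pvKeepB targets st.1 then st.1 ++ st.2 else st.2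

-- ===== PRECONDITION & SPEC =====
def Spec_strip_instances_of_py (body_lines : List String) (targets : List String) (out : List String) : Prop := out = strip_instances_of_py_alt body_lines targets
instance (body_lines : List String) (targets : List String) (out : List String) : Decidable (Spec_strip_instances_of_py body_lines targets out) := by unfold Spec_strip_instances_of_py; infer_instance

-- ===== CLAIM (what is proved, stated in full; the proofs are below) =====
def Claim_equal_strip_instances_of_py : Prop := ∀ (body_lines : List String) (targets : List String), Dom_strip_instances_of_py body_lines targets → Spec_strip_instances_of_py body_lines targets (strip_instances_of_py body_lines targets)

-- ===== LEMMAS AND PROOFS =====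

-- B's keep is the negation of A's skip on every (head, continuations) group
theorem pvKeepB_eq_not_skipA (targets : List String) (line : String) (conts : List String) :
    pvKeepB targets (line :: conts) = ! pvSkipA targets line conts := by
  unfold pvKeepB pvSkipA
  simp only []
  generalize PySem.Str.strip (pvJoinGroup line conts) = s
  generalize (parse_x_line s).2.2 = o
  generalize hM : PySem.Str.split₀ s = toks
  cases toks with
  | nil => split_ifs <;> simp_all
  | cons t0 ts =>
    cases hG : PySem.Str.pyGet? t0 0 <;> cases o <;> split_ifs <;> simp_all

-- the backward fold's state after processing ls is (continuation prefix of ls, A's output on the rest)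
theorem pvFoldr_inv (targets : List String) : ∀ ls : List String,
    ls.foldr (pvStepB targets) ([], []) =
      ((pvTakeConts ls).1, pvStripGoA targets (pvTakeConts ls).2) := by
  intro ls
  induction ls with
  | nil => simp [pvTakeConts, pvStripGoA]
  | cons l rest ih =>
    rw [List.foldr_cons, ih]
    by_cases h : pvIsCont l
    · simp [pvStepB, pvTakeConts, h]
    · simp only [pvStepB, h, Bool.false_eq_true, not_false_eq_true, if_neg, pvTakeConts]
      rw [pvStripGoA, pvKeepB_eq_not_skipA]
      by_cases hs : pvSkipA targets l (pvTakeConts rest).1 <;> simp [hs]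

-- ===== VERDICT (by name: the statement is the Claim_ definition above) =====
theorem strip_instances_of_py_spec : Claim_equal_strip_instances_of_py := by
  intro body_lines targets _
  unfold Spec_strip_instances_of_py strip_instances_of_py strip_instances_of_py_alt
  rw [pvFoldr_inv]
  cases body_lines with
  | nil => simp [pvTakeConts, pvStripGoA]
  | cons l rest =>
    by_cases h : pvIsCont l
    · simp only [pvTakeConts, h, if_pos]
      rw [pvStripGoA, pvKeepB_eq_not_skipA]
      by_cases hs : pvSkipA targets l (pvTakeConts rest).1 <;> simp [hs]
    · simp [pvTakeConts, h]
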